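-- pv_equiv track=rewrite | github.com/Jakcobo/Proyecto_ETL | src/transform/api_clean.py | _map_category_to_group
-- ===== SOURCE A (Python) =====
-- def _map_category_to_group(category_name: str) -> str:
--     """Mapea una categoría individual a un grupo de categorías definido."""
--     # Crear un diccionario de mapeo para agrupar las categorías
--     category = {
--         'cultural':                 ['Art Museum', 'Art Gallery', 'History Museum', 'Museum', 'Public Art', 'Cultural Center', 'Indie Movie Theater', 'Music Venue', 'Performing Arts Venue', 'Theater', 'Dance Studio', 'Science Museum', 'Sculpture Garden', 'Concert Hall'],
--         'restaurants':              ['Italian Restaurant', 'Fast Food Restaurant', 'Korean Restaurant', 'Thai Restaurant', 'Wine Bar', 'Brazilian Restaurant', 'Pizzeria', 'American Restaurant', 'French Restaurant', 'Mexican Restaurant', 'Chinese Restaurant', 'Latin American Restaurant', 'Greek Restaurant', 'Burger Joint', 'Deli', 'Cocktail Bar', 'Wine Store', 'Dessert Shop', 'Sandwich Spot', 'Seafood Restaurant', 'Café', 'Gastropub', 'Fried Chicken Joint', 'Coffee Shop', 'Pub', 'Kosher Restaurant', 'Cantonese Restaurant', 'Asian Restaurant', 'German Restaurant', 'Wings Joint',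 'Irish Pub'],
--         'parks_&_outdoor':          ['Urban Park', 'Lake', 'Park', 'Playground', 'State or Provincial Park', 'Botanical Garden', 'Picnic Area', 'Beach', 'Soccer Field', 'National Park', 'Hiking Trail', 'Campground', 'Scenic Lookout', 'Dog Park', 'Zoo', 'Zoo Exhibit'],
--         'retail_&_shopping':        ['Bakery', 'Grocery Store', 'Big Box Store', 'Gourmet Store', 'Electronics Store', 'Organic Grocery', 'Clothing Store', 'Toy Store', 'Department Store', 'Gift Store', 'Convenience Store', 'Shopping Mall', 'Supermarket', 'Retail', 'Shopping Plaza', 'Discount Store', 'Fruit and Vegetable Store', 'Furniture and Home Store', 'Video Games Store', 'Office Supply Store', 'Tobacco Store', 'Liquor Store', 'Beer Store', 'Warehouse or Wholesale Store'],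
--         'entertainment_&_leisure':  ['Movie Theater', 'Arcade', 'Bowling Alley', 'Amusement Park', 'Pool Hall', 'Event Space', 'Karaoke Bar', 'Sports Bar', 'Lounge', 'Beer Garden', 'Stadium', 'Rock Climbing Spot'],
--         'landmarks':                ['Landmarks and Outdoors', 'Monument', 'Bridge'],
--         'bars_&_clubs':             ['Bar', 'Gay Bar', 'Dive Bar', 'Cocktail Bar', 'Beer Bar', 'Hotel Bar', 'Beer Garden', 'Hookah Bar', 'Wine Store', 'Night Club', 'Rock Club', 'Comedy Club']
--     }
--     if not isinstance(category_name, str): # Manejar posibles NaNs o no strings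
--         return 'Other'
--     for group, categories_in_group in category.items():
--         if category_name in categories_in_group:
--             return group
--     return 'Other'
-- ===== SOURCE B (Python) =====
-- # Precomputed inverted index: category -> group. Entries follow the original
-- # groups in order; a category listed in more than one group keeps its FIRST
-- # group ('Cocktail Bar', 'Wine Store', 'Beer Garden'), matching the ordered scan.
-- _CATEGORY_TO_GROUP = {
--     'Art Museum': 'cultural',
--     'Art Gallery': 'cultural',
--     'History Museum': 'cultural',
--     'Museum': 'cultural',
--     'Public Art': 'cultural',
--     'Cultural Center': 'cultural',
--     'Indie Movie Theater': 'cultural',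
--     'Music Venue': 'cultural',
--     'Performing Arts Venue': 'cultural',
--     'Theater': 'cultural',
--     'Dance Studio': 'cultural',
--     'Science Museum': 'cultural',
--     'Sculpture Garden': 'cultural',
--     'Concert Hall': 'cultural',
--     'Italian Restaurant': 'restaurants',
--     'Fast Food Restaurant': 'restaurants',
--     'Korean Restaurant': 'restaurants',
--     'Thai Restaurant': 'restaurants',
--     'Wine Bar': 'restaurants',
--     'Brazilian Restaurant': 'restaurants',
--     'Pizzeria': 'restaurants',
--     'American Restaurant': 'restaurants',
--     'French Restaurant': 'restaurants',
--     'Mexican Restaurant': 'restaurants',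
--     'Chinese Restaurant': 'restaurants',
--     'Latin American Restaurant': 'restaurants',
--     'Greek Restaurant': 'restaurants',
--     'Burger Joint': 'restaurants',
--     'Deli': 'restaurants',
--     'Cocktail Bar': 'restaurants',
--     'Wine Store': 'restaurants',
--     'Dessert Shop': 'restaurants',
--     'Sandwich Spot': 'restaurants',
--     'Seafood Restaurant': 'restaurants',
--     'Café': 'restaurants',
--     'Gastropub': 'restaurants',
--     'Fried Chicken Joint': 'restaurants',
--     'Coffee Shop': 'restaurants',
--     'Pub': 'restaurants',
--     'Kosher Restaurant': 'restaurants',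
--     'Cantonese Restaurant': 'restaurants',
--     'Asian Restaurant': 'restaurants',
--     'German Restaurant': 'restaurants',
--     'Wings Joint': 'restaurants',
--     'Irish Pub': 'restaurants',
--     'Urban Park': 'parks_&_outdoor',
--     'Lake': 'parks_&_outdoor',
--     'Park': 'parks_&_outdoor',
--     'Playground': 'parks_&_outdoor',
--     'State or Provincial Park': 'parks_&_outdoor',
--     'Botanical Garden': 'parks_&_outdoor',
--     'Picnic Area': 'parks_&_outdoor',
--     'Beach': 'parks_&_outdoor',
--     'Soccer Field': 'parks_&_outdoor',
--     'National Park': 'parks_&_outdoor',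
--     'Hiking Trail': 'parks_&_outdoor',
--     'Campground': 'parks_&_outdoor',
--     'Scenic Lookout': 'parks_&_outdoor',
--     'Dog Park': 'parks_&_outdoor',
--     'Zoo': 'parks_&_outdoor',
--     'Zoo Exhibit': 'parks_&_outdoor',
--     'Bakery': 'retail_&_shopping',
--     'Grocery Store': 'retail_&_shopping',
--     'Big Box Store': 'retail_&_shopping',
--     'Gourmet Store': 'retail_&_shopping',
--     'Electronics Store': 'retail_&_shopping',
--     'Organic Grocery': 'retail_&_shopping',
--     'Clothing Store': 'retail_&_shopping',
--     'Toy Store': 'retail_&_shopping',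
--     'Department Store': 'retail_&_shopping',
--     'Gift Store': 'retail_&_shopping',
--     'Convenience Store': 'retail_&_shopping',
--     'Shopping Mall': 'retail_&_shopping',
--     'Supermarket': 'retail_&_shopping',
--     'Retail': 'retail_&_shopping',
--     'Shopping Plaza': 'retail_&_shopping',
--     'Discount Store': 'retail_&_shopping',
--     'Fruit and Vegetable Store': 'retail_&_shopping',
--     'Furniture and Home Store': 'retail_&_shopping',
--     'Video Games Store': 'retail_&_shopping',
--     'Office Supply Store': 'retail_&_shopping',
--     'Tobacco Store': 'retail_&_shopping',
--     'Liquor Store': 'retail_&_shopping',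
--     'Beer Store': 'retail_&_shopping',
--     'Warehouse or Wholesale Store': 'retail_&_shopping',
--     'Movie Theater': 'entertainment_&_leisure',
--     'Arcade': 'entertainment_&_leisure',
--     'Bowling Alley': 'entertainment_&_leisure',
--     'Amusement Park': 'entertainment_&_leisure',
--     'Pool Hall': 'entertainment_&_leisure',
--     'Event Space': 'entertainment_&_leisure',
--     'Karaoke Bar': 'entertainment_&_leisure',
--     'Sports Bar': 'entertainment_&_leisure',
--     'Lounge': 'entertainment_&_leisure',
--     'Beer Garden': 'entertainment_&_leisure',
--     'Stadium': 'entertainment_&_leisure',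
--     'Rock Climbing Spot': 'entertainment_&_leisure',
--     'Landmarks and Outdoors': 'landmarks',
--     'Monument': 'landmarks',
--     'Bridge': 'landmarks',
--     'Bar': 'bars_&_clubs',
--     'Gay Bar': 'bars_&_clubs',
--     'Dive Bar': 'bars_&_clubs',
--     'Beer Bar': 'bars_&_clubs',
--     'Hotel Bar': 'bars_&_clubs',
--     'Hookah Bar': 'bars_&_clubs',
--     'Night Club': 'bars_&_clubs',
--     'Rock Club': 'bars_&_clubs',
--     'Comedy Club': 'bars_&_clubs',
-- }
--
--
-- def _map_category_to_group(category_name: str) -> str: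
--     """Mapea una categoría individual a un grupo de categorías definido."""
--     if not isinstance(category_name, str):
--         return 'Other'
--     return _CATEGORY_TO_GROUP.get(category_name, 'Other')
-- ===== Notes on version B (the rewrite author's own statement) =====
-- stated objective: idiomatic
-- what changed: Replaces A's per-call ordered scan over eight group lists with a single .get lookup in a precomputed inverted category->group dict written out as data (first group already resolved for duplicate categories).
import Mathlib
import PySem

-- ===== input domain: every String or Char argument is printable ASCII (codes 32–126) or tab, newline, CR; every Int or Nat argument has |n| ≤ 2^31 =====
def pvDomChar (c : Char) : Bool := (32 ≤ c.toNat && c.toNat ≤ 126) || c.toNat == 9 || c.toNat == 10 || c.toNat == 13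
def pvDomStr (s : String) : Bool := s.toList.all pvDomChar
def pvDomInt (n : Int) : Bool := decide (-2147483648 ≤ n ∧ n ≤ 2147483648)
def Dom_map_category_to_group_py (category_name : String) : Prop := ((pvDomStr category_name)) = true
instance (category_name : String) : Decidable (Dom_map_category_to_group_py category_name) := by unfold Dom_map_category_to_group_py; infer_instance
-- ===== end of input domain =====

-- B replaces A's per-call ordered scan of the group lists by a single lookup in a
-- precomputed inverted table (category -> group, first group wins), written out as data.


-- ===== PORT A =====
-- A's dict literal of groups, as items in insertion order
def pvGroups : List (String × List String) :=
  [("cultural", ["Art Museum", "Art Gallery", "History Museum", "Museum", "Public Art", "Cultural Center", "Indie Movie Theater", "Music Venue", "Performing Arts Venue", "Theater", "Dance Studio", "Science Museum", "Sculpture Garden", "Concert Hall"]),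
   ("restaurants", ["Italian Restaurant", "Fast Food Restaurant", "Korean Restaurant", "Thai Restaurant", "Wine Bar", "Brazilian Restaurant", "Pizzeria", "American Restaurant", "French Restaurant", "Mexican Restaurant", "Chinese Restaurant", "Latin American Restaurant", "Greek Restaurant", "Burger Joint", "Deli", "Cocktail Bar", "Wine Store", "Dessert Shop", "Sandwich Spot", "Seafood Restaurant", "Café", "Gastropub", "Fried Chicken Joint", "Coffee Shop", "Pub", "Kosher Restaurant", "Cantonese Restaurant", "Asian Restaurant", "German Restaurant", "Wings Joint", "Irish Pub"]),
   ("parks_&_outdoor", ["Urban Park", "Lake", "Park", "Playground", "State or Provincial Park", "Botanical Garden", "Picnic Area", "Beach", "Soccer Field", "National Park", "Hiking Trail", "Campground", "Scenic Lookout", "Dog Park", "Zoo", "Zoo Exhibit"]),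
   ("retail_&_shopping", ["Bakery", "Grocery Store", "Big Box Store", "Gourmet Store", "Electronics Store", "Organic Grocery", "Clothing Store", "Toy Store", "Department Store", "Gift Store", "Convenience Store", "Shopping Mall", "Supermarket", "Retail", "Shopping Plaza", "Discount Store", "Fruit and Vegetable Store", "Furniture and Home Store", "Video Games Store", "Office Supply Store", "Tobacco Store", "Liquor Store", "Beer Store", "Warehouse or Wholesale Store"]),
   ("entertainment_&_leisure", ["Movie Theater", "Arcade", "Bowling Alley", "Amusement Park", "Pool Hall", "Event Space", "Karaoke Bar", "Sports Bar", "Lounge", "Beer Garden", "Stadium", "Rock Climbing Spot"]),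
   ("landmarks", ["Landmarks and Outdoors", "Monument", "Bridge"]),
   ("bars_&_clubs", ["Bar", "Gay Bar", "Dive Bar", "Cocktail Bar", "Beer Bar", "Hotel Bar", "Beer Garden", "Hookah Bar", "Wine Store", "Night Club", "Rock Club", "Comedy Club"])]

-- A's for-loop over category.items() with an early return on membership
def pvScanA (s : String) : List (String × List String) → String
  | [] => "Other"
  | (g, cats) :: rest => if cats.contains s then g else pvScanA s rest

def map_category_to_group_py (category_name : String) : String :=
  pvScanA category_name pvGroups

-- ===== PORT B =====
-- Source B's precomputed inverted table _CATEGORY_TO_GROUP, same literal entries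
def pvInvPairs : List (String × String) :=
  [("Art Museum", "cultural"),
   ("Art Gallery", "cultural"),
   ("History Museum", "cultural"),
   ("Museum", "cultural"),
   ("Public Art", "cultural"),
   ("Cultural Center", "cultural"),
   ("Indie Movie Theater", "cultural"),
   ("Music Venue", "cultural"),
   ("Performing Arts Venue", "cultural"),
   ("Theater", "cultural"),
   ("Dance Studio", "cultural"),
   ("Science Museum", "cultural"),
   ("Sculpture Garden", "cultural"),
   ("Concert Hall", "cultural"),
   ("Italian Restaurant", "restaurants"),
   ("Fast Food Restaurant", "restaurants"),
   ("Korean Restaurant", "restaurants"),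
   ("Thai Restaurant", "restaurants"),
   ("Wine Bar", "restaurants"),
   ("Brazilian Restaurant", "restaurants"),
   ("Pizzeria", "restaurants"),
   ("American Restaurant", "restaurants"),
   ("French Restaurant", "restaurants"),
   ("Mexican Restaurant", "restaurants"),
   ("Chinese Restaurant", "restaurants"),
   ("Latin American Restaurant", "restaurants"),
   ("Greek Restaurant", "restaurants"),
   ("Burger Joint", "restaurants"),
   ("Deli", "restaurants"),
   ("Cocktail Bar", "restaurants"),
   ("Wine Store", "restaurants"),
   ("Dessert Shop", "restaurants"),
   ("Sandwich Spot", "restaurants"),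
   ("Seafood Restaurant", "restaurants"),
   ("Café", "restaurants"),
   ("Gastropub", "restaurants"),
   ("Fried Chicken Joint", "restaurants"),
   ("Coffee Shop", "restaurants"),
   ("Pub", "restaurants"),
   ("Kosher Restaurant", "restaurants"),
   ("Cantonese Restaurant", "restaurants"),
   ("Asian Restaurant", "restaurants"),
   ("German Restaurant", "restaurants"),
   ("Wings Joint", "restaurants"),
   ("Irish Pub", "restaurants"),
   ("Urban Park", "parks_&_outdoor"),
   ("Lake", "parks_&_outdoor"),
   ("Park", "parks_&_outdoor"),
   ("Playground", "parks_&_outdoor"),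
   ("State or Provincial Park", "parks_&_outdoor"),
   ("Botanical Garden", "parks_&_outdoor"),
   ("Picnic Area", "parks_&_outdoor"),
   ("Beach", "parks_&_outdoor"),
   ("Soccer Field", "parks_&_outdoor"),
   ("National Park", "parks_&_outdoor"),
   ("Hiking Trail", "parks_&_outdoor"),
   ("Campground", "parks_&_outdoor"),
   ("Scenic Lookout", "parks_&_outdoor"),
   ("Dog Park", "parks_&_outdoor"),
   ("Zoo", "parks_&_outdoor"),
   ("Zoo Exhibit", "parks_&_outdoor"),
   ("Bakery", "retail_&_shopping"),
   ("Grocery Store", "retail_&_shopping"),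
   ("Big Box Store", "retail_&_shopping"),
   ("Gourmet Store", "retail_&_shopping"),
   ("Electronics Store", "retail_&_shopping"),
   ("Organic Grocery", "retail_&_shopping"),
   ("Clothing Store", "retail_&_shopping"),
   ("Toy Store", "retail_&_shopping"),
   ("Department Store", "retail_&_shopping"),
   ("Gift Store", "retail_&_shopping"),
   ("Convenience Store", "retail_&_shopping"),
   ("Shopping Mall", "retail_&_shopping"),
   ("Supermarket", "retail_&_shopping"),
   ("Retail", "retail_&_shopping"),
   ("Shopping Plaza", "retail_&_shopping"),
   ("Discount Store", "retail_&_shopping"),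
   ("Fruit and Vegetable Store", "retail_&_shopping"),
   ("Furniture and Home Store", "retail_&_shopping"),
   ("Video Games Store", "retail_&_shopping"),
   ("Office Supply Store", "retail_&_shopping"),
   ("Tobacco Store", "retail_&_shopping"),
   ("Liquor Store", "retail_&_shopping"),
   ("Beer Store", "retail_&_shopping"),
   ("Warehouse or Wholesale Store", "retail_&_shopping"),
   ("Movie Theater", "entertainment_&_leisure"),
   ("Arcade", "entertainment_&_leisure"),
   ("Bowling Alley", "entertainment_&_leisure"),
   ("Amusement Park", "entertainment_&_leisure"),
   ("Pool Hall", "entertainment_&_leisure"),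
   ("Event Space", "entertainment_&_leisure"),
   ("Karaoke Bar", "entertainment_&_leisure"),
   ("Sports Bar", "entertainment_&_leisure"),
   ("Lounge", "entertainment_&_leisure"),
   ("Beer Garden", "entertainment_&_leisure"),
   ("Stadium", "entertainment_&_leisure"),
   ("Rock Climbing Spot", "entertainment_&_leisure"),
   ("Landmarks and Outdoors", "landmarks"),
   ("Monument", "landmarks"),
   ("Bridge", "landmarks"),
   ("Bar", "bars_&_clubs"),
   ("Gay Bar", "bars_&_clubs"),
   ("Dive Bar", "bars_&_clubs"),
   ("Beer Bar", "bars_&_clubs"),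
   ("Hotel Bar", "bars_&_clubs"),
   ("Hookah Bar", "bars_&_clubs"),
   ("Night Club", "bars_&_clubs"),
   ("Rock Club", "bars_&_clubs"),
   ("Comedy Club", "bars_&_clubs")]

def map_category_to_group_py_alt (category_name : String) : String :=
  (PySem.Dict.ofList pvInvPairs).getD category_name "Other"

-- ===== PRECONDITION & SPEC =====
def Spec_map_category_to_group_py (category_name : String) (out : String) : Prop := out = map_category_to_group_py_alt category_name
instance (category_name : String) (out : String) : Decidable (Spec_map_category_to_group_py category_name out) := by unfold Spec_map_category_to_group_py; infer_instance

-- ===== CLAIM =====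
def Claim_equal_map_category_to_group_py : Prop := ∀ (category_name : String), Dom_map_category_to_group_py category_name → Spec_map_category_to_group_py category_name (map_category_to_group_py category_name)

-- ===== LEMMAS AND PROOFS =====

-- optional result of A's scan: first group whose list contains s
def pvScanOpt (s : String) : List (String × List String) → Option String
  | [] => none
  | (g, cats) :: rest => if cats.contains s then some g else pvScanOpt s rest

theorem pvScanA_eq_opt (s : String) (gs : List (String × List String)) :
    pvScanA s gs = (pvScanOpt s gs).getD "Other" := by
  induction gs with
  | nil => rfl
  | cons p rest ih =>
    obtain ⟨g, cats⟩ := p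
    simp only [pvScanA, pvScanOpt]
    split <;> simp [ih]

-- the inverted index, re-derived from A's table with setdefault (first group wins)
def pvIndexFold : PySem.Dict String String :=
  pvGroups.foldl (fun d p => p.2.foldl (fun d c => d.setdefault c p.1) d) PySem.Dict.empty

-- one setdefault loop over a single group's list
theorem get?_setdefault_fold (g s : String) (cats : List String) (d : PySem.Dict String String) :
    (cats.foldl (fun d c => d.setdefault c g) d).get? s
      = ((d.get? s).orElse (fun _ => if cats.contains s then some g else none)) := by
  induction cats generalizing d with
  | nil => rcases h : d.get? s with _ | v <;> simp [h, Option.orElse]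
  | cons c rest ih =>
    simp only [List.foldl, ih]
    by_cases hc : s = c
    · subst hc
      rcases h : d.get? s with _ | v
      · have hnc : d.contains s = false := by
          rw [PySem.Dict.contains_eq_isSome_get?, h]; rfl
        rw [PySem.Dict.setdefault_of_not_contains _ _ hnc,
            PySem.Dict.get?_insert_self]
        simp [Option.orElse]
      · have hcn : d.contains s = true := by
          rw [PySem.Dict.contains_eq_isSome_get?, h]; rfl
        rw [PySem.Dict.setdefault_of_contains _ _ hcn]
        simp [h, Option.orElse]
    · rw [PySem.Dict.get?_setdefault_of_ne _ _ hc]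
      cases d.get? s <;> simp [Option.orElse, hc]

-- the whole index-building loop versus A's scan
theorem get?_build_fold (s : String) (gs : List (String × List String)) (d : PySem.Dict String String) :
    (gs.foldl (fun d p => p.2.foldl (fun d c => d.setdefault c p.1) d) d).get? s
      = ((d.get? s).orElse (fun _ => pvScanOpt s gs)) := by
  induction gs generalizing d with
  | nil => rcases h : d.get? s with _ | v <;> simp [h, pvScanOpt, Option.orElse]
  | cons p rest ih =>
    obtain ⟨g, cats⟩ := p
    simp only [List.foldl, ih, get?_setdefault_fold, pvScanOpt]
    cases d.get? s
    · by_cases hm : s ∈ cats <;> simp [hm, Option.orElse]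
    · simp [Option.orElse]

-- B's literal table is exactly the index that setdefault over A's table builds
set_option maxRecDepth 100000 in
theorem invPairs_eq_fold : PySem.Dict.ofList pvInvPairs = pvIndexFold := by decide

-- ===== VERDICT =====
theorem map_category_to_group_py_spec : Claim_equal_map_category_to_group_py := by
  intro s _
  show map_category_to_group_py s = map_category_to_group_py_alt s
  rw [map_category_to_group_py, map_category_to_group_py_alt, pvScanA_eq_opt,
      invPairs_eq_fold, PySem.Dict.getD_eq_get?_getD, pvIndexFold, get?_build_fold]
  simp [PySem.Dict.get?_empty, Option.orElse]
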